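-- pv_equiv track=rewrite | github.com/caitlinturner/turner2025WRR | exposure_time_calculations/systemwide_exposuretime_2D.py | find_common_indices_info
-- ===== SOURCE A (Python) =====
-- def find_common_indices_info(data, x_key, y_key, xind_range, yind_range):
--     if x_key not in data or y_key not in data:
--         return {}
--
--     common_info = {key: [] for key in data.keys()}
--
--     xinds = data[x_key]
--     yinds = data[y_key]
--
--     if not xinds or not yinds:
--         return common_info
--
--     xind_min, xind_max = xind_range
--     yind_min, yind_max = yind_range
--
--     count = 0
--
--     for index in range(len(xinds)):
--         if xinds[index] and yinds[index] and (xind_min <= xinds[index][0] <= xind_max) and (yind_min <= yinds[index][0] <= yind_max):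
--             for key in data.keys():
--                 common_info[key].append(data[key][index])
--             count += 1
--
--     return common_info
-- ===== SOURCE B (Python) =====
-- def find_common_indices_info(data, x_key, y_key, xind_range, yind_range):
--     if x_key not in data or y_key not in data:
--         return {}
--     if not data[x_key] or not data[y_key]:
--         return {key: [] for key in data}
--     keys = list(data)
--     xi = keys.index(x_key)
--     yi = keys.index(y_key)
--     (xind_min, xind_max), (yind_min, yind_max) = xind_range, yind_range
--     kept = [row for row in zip(*data.values())
--             if row[xi] and row[yi]
--             and xind_min <= row[xi][0] <= xind_max
--             and yind_min <= row[yi][0] <= yind_max]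
--     cols_back = zip(*kept) if kept else [[] for _ in keys]
--     return {key: list(col) for key, col in zip(keys, cols_back)}
-- ===== Notes on version B (the rewrite author's own statement) =====
-- stated objective: alternative
-- what changed: A scans row indices and appends per key into a mutable dict (column-wise, interleaved); B transposes the columns into row tuples with zip(*data.values()), filters whole rows by the x/y predicate, and transposes the kept rows back with zip(*kept) (row-wise: transpose-filter-transpose).
import Mathlib
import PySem

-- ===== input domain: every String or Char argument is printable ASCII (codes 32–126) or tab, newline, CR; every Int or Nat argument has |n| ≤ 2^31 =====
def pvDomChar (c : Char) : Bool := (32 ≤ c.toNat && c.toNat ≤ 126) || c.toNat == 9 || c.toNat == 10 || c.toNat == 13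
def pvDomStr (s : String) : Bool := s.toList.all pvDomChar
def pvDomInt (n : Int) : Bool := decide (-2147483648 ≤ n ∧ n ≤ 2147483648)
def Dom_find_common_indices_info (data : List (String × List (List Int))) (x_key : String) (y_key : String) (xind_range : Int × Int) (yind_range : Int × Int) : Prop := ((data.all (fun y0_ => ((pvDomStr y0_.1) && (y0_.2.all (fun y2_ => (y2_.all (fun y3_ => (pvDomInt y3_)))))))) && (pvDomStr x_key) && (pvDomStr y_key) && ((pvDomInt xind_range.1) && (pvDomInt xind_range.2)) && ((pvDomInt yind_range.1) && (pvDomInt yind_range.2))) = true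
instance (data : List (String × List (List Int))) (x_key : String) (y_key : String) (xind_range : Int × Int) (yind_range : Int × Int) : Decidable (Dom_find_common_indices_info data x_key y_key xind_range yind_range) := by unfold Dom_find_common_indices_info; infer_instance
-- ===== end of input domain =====

-- B replaces A's column-wise interleaved scan (row loop appending per key into a mutable dict)
-- by a row-wise transpose–filter–transpose: zip the columns into rows, filter whole rows,
-- zip the kept rows back; objective: alternative (no speed claim).

-- ===== PORT A =====
-- A's row guard 'xinds[index] and yinds[index] and xmin <= xinds[index][0] <= xmax and
-- ymin <= yinds[index][0] <= ymax'. Out-of-range access uses the default [] (Python would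
-- raise there; such inputs are outside Pre_).
def fci_ok (xinds yinds : List (List Int)) (xind_range yind_range : Int × Int) (i : Nat) : Bool :=
  let xi := xinds.getD i []
  let yi := yinds.getD i []
  !xi.isEmpty && !yi.isEmpty &&
    decide (xind_range.1 ≤ xi.headD 0 ∧ xi.headD 0 ≤ xind_range.2 ∧
            yind_range.1 ≤ yi.headD 0 ∧ yi.headD 0 ≤ yind_range.2)

-- Transliteration of A: membership test + data[x_key]/data[y_key] = assoc-list lookup (first
-- match, as for a dict); common_info built key by key with Dict.insert; the row loop appends
-- data[key][index] into common_info[key] via Dict.modify, exactly A's nested loops.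
-- A's 'count' variable is dead (never read) and has no Lean counterpart.
def find_common_indices_info (data : List (String × List (List Int))) (x_key : String) (y_key : String) (xind_range : Int × Int) (yind_range : Int × Int) : List (String × List (List Int)) :=
  match data.lookup x_key, data.lookup y_key with
  | some xinds, some yinds =>
    let common0 : PySem.Dict String (List (List Int)) :=
      (data.map Prod.fst).foldl (fun d k => d.insert k []) PySem.Dict.empty
    if xinds.isEmpty || yinds.isEmpty then common0.items
    else
      ((List.range xinds.length).foldl (fun c i =>
        if fci_ok xinds yinds xind_range yind_range i then
          (data.map Prod.fst).foldl
            (fun d k => d.modify k [] (fun l => l ++ [((data.lookup k).getD []).getD i []])) c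
        else c) common0).items
  | _, _ => []

-- ===== PORT B =====
-- Port of Python's zip(*cols) on a list of columns: rows truncated at the shortest column
-- (exact: Python's zip stops at the first exhausted iterable; a row tuple becomes a List).
def pyZip (cols : List (List (List Int))) : List (List (List Int)) :=
  (List.range (((cols.map List.length).min?).getD 0)).map
    (fun i => cols.map (fun c => c.getD i []))

-- Source B's row comprehension guard 'row[xi] and row[yi] and xmin <= row[xi][0] <= xmax and
-- ymin <= row[yi][0] <= ymax' (in-range projections; outside Pre_ in Python otherwise).
def fci_rowOk (xi yi : Nat) (xind_range yind_range : Int × Int) (row : List (List Int)) : Bool :=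
  !(row.getD xi []).isEmpty && !(row.getD yi []).isEmpty &&
    decide (xind_range.1 ≤ (row.getD xi []).headD 0 ∧ (row.getD xi []).headD 0 ≤ xind_range.2 ∧
            yind_range.1 ≤ (row.getD yi []).headD 0 ∧ (row.getD yi []).headD 0 ≤ yind_range.2)

-- Transliteration of Source B: guards, keys.index = List.idxOf, the kept-rows comprehension is a
-- filter over pyZip of the columns, cols_back re-transposes (or all-empty columns if no row
-- was kept), and the final dict comprehension is zip(keys, cols_back).
def find_common_indices_info_alt (data : List (String × List (List Int))) (x_key : String) (y_key : String) (xind_range : Int × Int) (yind_range : Int × Int) : List (String × List (List Int)) :=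
  match data.lookup x_key with
  | none => []
  | some xinds =>
  match data.lookup y_key with
  | none => []
  | some yinds =>
    if xinds.isEmpty || yinds.isEmpty then data.map (fun p => (p.1, []))
    else
      let keys := data.map Prod.fst
      let xi := keys.idxOf x_key
      let yi := keys.idxOf y_key
      let kept := (pyZip (data.map Prod.snd)).filter (fci_rowOk xi yi xind_range yind_range)
      let colsBack := if kept.isEmpty then keys.map (fun _ => ([] : List (List Int))) else pyZip kept
      keys.zip colsBack

-- ===== PRECONDITION & SPEC =====
-- Pre_ excludes (a) assoc lists with duplicate keys, which do not represent a Python dict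
-- (a dict literally cannot hold them), and (b) inputs where A raises IndexError: a row index
-- with a nonempty x-entry but out of range for yinds, or a matching row index out of range
-- for some key's list (B's zip truncates and returns there, so those inputs are outside Pre_).
def Pre_find_common_indices_info (data : List (String × List (List Int))) (x_key : String) (y_key : String) (xind_range : Int × Int) (yind_range : Int × Int) : Prop :=
  (data.map Prod.fst).Nodup ∧
  ((data.lookup y_key).getD [] = [] ∨
    ∀ i < ((data.lookup x_key).getD []).length,
      ((data.lookup x_key).getD []).getD i [] ≠ [] →
        i < ((data.lookup y_key).getD []).length ∧
        ((((data.lookup y_key).getD []).getD i [] ≠ [] ∧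
          xind_range.1 ≤ (((data.lookup x_key).getD []).getD i []).headD 0 ∧
          (((data.lookup x_key).getD []).getD i []).headD 0 ≤ xind_range.2 ∧
          yind_range.1 ≤ (((data.lookup y_key).getD []).getD i []).headD 0 ∧
          (((data.lookup y_key).getD []).getD i []).headD 0 ≤ yind_range.2) →
         ∀ p ∈ data, i < p.2.length))
instance (data : List (String × List (List Int))) (x_key : String) (y_key : String) (xind_range : Int × Int) (yind_range : Int × Int) : Decidable (Pre_find_common_indices_info data x_key y_key xind_range yind_range) := by unfold Pre_find_common_indices_info; infer_instance

def pvWitness_find_common_indices_info : (List (String × List (List Int))) × String × String × (Int × Int) × (Int × Int) :=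
  ([("x", [[0]]), ("y", [[1]])], "x", "y", (0, 0), (1, 1))

def Spec_find_common_indices_info (data : List (String × List (List Int))) (x_key : String) (y_key : String) (xind_range : Int × Int) (yind_range : Int × Int) (out : List (String × List (List Int))) : Prop := out = find_common_indices_info_alt data x_key y_key xind_range yind_range
instance (data : List (String × List (List Int))) (x_key : String) (y_key : String) (xind_range : Int × Int) (yind_range : Int × Int) (out : List (String × List (List Int))) : Decidable (Spec_find_common_indices_info data x_key y_key xind_range yind_range out) := by unfold Spec_find_common_indices_info; infer_instance

-- ===== CLAIM (what is proved, stated in full; the proofs are below) =====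
def Claim_equal_find_common_indices_info : Prop := ∀ (data : List (String × List (List Int))) (x_key : String) (y_key : String) (xind_range : Int × Int) (yind_range : Int × Int), Dom_find_common_indices_info data x_key y_key xind_range yind_range → Pre_find_common_indices_info data x_key y_key xind_range yind_range → Spec_find_common_indices_info data x_key y_key xind_range yind_range (find_common_indices_info data x_key y_key xind_range yind_range)

-- ===== LEMMAS AND PROOFS =====

-- First-match lookup of a present key in a dup-free assoc list returns its value.
theorem fci_lookup_of_mem {V : Type} (data : List (String × V)) (p : String × V)
    (hnd : (data.map Prod.fst).Nodup) (hp : p ∈ data) : data.lookup p.1 = some p.2 := by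
  induction data with
  | nil => cases hp
  | cons q rest ih =>
    simp only [List.map_cons, List.nodup_cons] at hnd
    cases hp with
    | head => simp [List.lookup]
    | tail _ h =>
      have hne : (p.1 == q.1) = false := by
        refine beq_eq_false_iff_ne.mpr (fun he => hnd.1 ?_)
        exact he ▸ List.mem_map_of_mem h
      simp [List.lookup, hne, ih hnd.2 h]

-- A's inner loop: modifying each key of a dup-free dict once rewrites every entry in place.
theorem fci_inner {V : Type} (f : String → V → V) (dflt : V) :
  ∀ (M P : List (String × V)), (((P ++ M).map Prod.fst).Nodup) →
  ((M.map Prod.fst).foldl (fun d k => PySem.Dict.modify d k dflt (f k)) (PySem.Dict.mk (P ++ M))).items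
    = P ++ M.map (fun p => (p.1, f p.1 p.2)) := by
  intro M
  induction M with
  | nil => intro P _; simp
  | cons q M' ih =>
    intro P hnd
    have hnd0 := hnd
    simp only [List.map_append, List.map_cons, List.nodup_append, List.nodup_cons] at hnd
    obtain ⟨hndP, ⟨hqM', hndM'⟩, hdisj⟩ := hnd
    have hP : q.1 ∉ P.map Prod.fst := by
      intro hmem
      exact hdisj _ hmem _ (List.mem_cons_self ..) rfl
    have hne_of_memP : ∀ p ∈ P, (p.1 == q.1) = false := fun p hp =>
      beq_eq_false_iff_ne.mpr (fun he => hP (he ▸ List.mem_map_of_mem hp))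
    have hne_of_memM : ∀ p ∈ M', (p.1 == q.1) = false := fun p hp =>
      beq_eq_false_iff_ne.mpr (fun he => hqM' (he ▸ List.mem_map_of_mem hp))
    have hfindP : P.find? (fun p => p.1 == q.1) = none :=
      List.find?_eq_none.mpr (fun p hp => by simp [hne_of_memP p hp])
    have hstep : PySem.Dict.modify (PySem.Dict.mk (P ++ q :: M')) q.1 dflt (f q.1)
        = PySem.Dict.mk ((P ++ [(q.1, f q.1 q.2)]) ++ M') := by
      have hgd : (PySem.Dict.mk (P ++ q :: M')).getD q.1 dflt = q.2 := by
        simp [PySem.Dict.getD, PySem.Dict.get?, List.find?_append, hfindP]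
      have hc : (PySem.Dict.mk (P ++ q :: M')).contains q.1 = true := by
        simp [PySem.Dict.contains]
      have hPmap : P.map (fun p => if p.1 == q.1 then (q.1, f q.1 q.2) else p) = P := by
        conv_rhs => rw [← List.map_id P]
        exact List.map_congr_left (fun p hp => by simp [hne_of_memP p hp])
      have hMmap : M'.map (fun p => if p.1 == q.1 then (q.1, f q.1 q.2) else p) = M' := by
        conv_rhs => rw [← List.map_id M']
        exact List.map_congr_left (fun p hp => by simp [hne_of_memM p hp])
      simp only [PySem.Dict.modify, hgd, PySem.Dict.insert, hc, if_pos]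
      congr 1
      rw [List.map_append, List.map_cons]
      simp only [hPmap, hMmap, beq_self_eq_true, if_true]
      simp
    have hnd' : (((P ++ [(q.1, f q.1 q.2)]) ++ M').map Prod.fst).Nodup := by
      simp only [List.map_append, List.map_cons, List.append_assoc,
        List.cons_append, List.nil_append] at hnd0 ⊢
      exact hnd0
    have := ih ((P ++ [(q.1, f q.1 q.2)])) hnd'
    simp only [List.map_cons, List.foldl_cons, hstep, this]
    simp

-- A's outer loop characterised: after folding the row loop over any index list, the dict's
-- items are the per-key gather over the filtered indices.
theorem fci_loop (data : List (String × List (List Int)))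
    (hnd : (data.map Prod.fst).Nodup) (ok : Nat → Bool) :
  ∀ (ixs : List Nat) (g : String × List (List Int) → List (List Int)),
  ((ixs.foldl (fun c i =>
      if ok i then
        (data.map Prod.fst).foldl
          (fun d k => PySem.Dict.modify d k [] (fun l => l ++ [((data.lookup k).getD []).getD i []])) c
      else c)
    (PySem.Dict.mk (data.map (fun p => (p.1, g p))))).items)
  = data.map (fun p => (p.1, g p ++ (ixs.filter ok).map (fun i => p.2.getD i []))) := by
  intro ixs
  induction ixs with
  | nil => intro g; simp
  | cons i ixs ih =>
    intro g
    by_cases hok : ok i = true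
    · simp only [List.foldl_cons, hok, if_true, List.filter_cons_of_pos hok]
      have hM : (data.map (fun p => (p.1, g p))).map Prod.fst = data.map Prod.fst := by
        simp
      have hinner := fci_inner (fun k l => l ++ [((data.lookup k).getD []).getD i []]) []
          (data.map (fun p => (p.1, g p))) [] (by rw [List.nil_append, hM]; exact hnd)
      rw [List.nil_append] at hinner
      rw [hM] at hinner
      have hD1 : ((data.map Prod.fst).foldl
          (fun d k => PySem.Dict.modify d k [] (fun l => l ++ [((data.lookup k).getD []).getD i []]))
          (PySem.Dict.mk (data.map (fun p => (p.1, g p)))))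
          = PySem.Dict.mk (data.map (fun p => (p.1, g p ++ [p.2.getD i []]))) := by
        apply PySem.Dict.ext
        rw [hinner]
        simp only [List.nil_append, List.map_map]
        refine List.map_congr_left (fun p hp => ?_)
        simp [fci_lookup_of_mem data p hnd hp]
      rw [hD1, ih (fun p => g p ++ [p.2.getD i []])]
      refine List.map_congr_left (fun p hp => ?_)
      simp
    · have hok' : ok i = false := by simpa using hok
      have hf : List.filter ok (i :: ixs) = List.filter ok ixs := by
        simp [hok']
      simp only [List.foldl_cons, hok', Bool.false_eq_true, if_false, hf]
      exact ih g

-- A's initial dict: inserting every (dup-free) key with value [] lists the keys in order.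
theorem fci_init (data : List (String × List (List Int))) (hnd : (data.map Prod.fst).Nodup) :
    ((data.map Prod.fst).foldl (fun d k => PySem.Dict.insert d k []) PySem.Dict.empty).items
      = data.map (fun p => (p.1, ([] : List (List Int)))) := by
  have h := PySem.Dict.items_foldl_insert_fresh (l := data.map Prod.fst) (k := fun x => x)
      (v := fun _ => ([] : List (List Int))) (d := PySem.Dict.empty)
      (by intro a _; simp) (by simpa using hnd)
  simpa using h

-- getD through a map, at an in-range index.
theorem fci_getD_map {α β : Type} (f : α → β) (l : List α) (j : Nat) (d : β)
    (h : j < l.length) : (l.map f).getD j d = f l[j] := by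
  simp [List.getD, List.getElem?_map, List.getElem?_eq_getElem h]

-- keys.index k and data[k] agree: idxOf of a present key is in range and its column is
-- the first-match lookup value.
theorem fci_lookup_idxOf {V : Type} :
    ∀ (data : List (String × V)) (k : String) (v : V), data.lookup k = some v →
      (data.map Prod.fst).idxOf k < data.length ∧
        ∀ d, (data.map Prod.snd).getD ((data.map Prod.fst).idxOf k) d = v := by
  intro data
  induction data with
  | nil => intro k v h; cases h
  | cons q rest ih =>
    intro k v h
    by_cases he : k = q.1
    · subst he
      simp [List.lookup] at h
      subst h
      constructor
      · simp
      · intro d; simp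
    · have hbeq : (k == q.1) = false := beq_eq_false_iff_ne.mpr he
      have hbeq' : (q.1 == k) = false := beq_eq_false_iff_ne.mpr (Ne.symm he)
      simp [List.lookup, hbeq] at h
      obtain ⟨hlt, hgd⟩ := ih k v h
      constructor
      · simpa [List.idxOf_cons, hbeq'] using Nat.succ_lt_succ hlt
      · intro d
        simpa [List.idxOf_cons, hbeq'] using hgd d

-- i is below the minimum of a nonempty list when it is below every element.
theorem fci_lt_min (l : List Nat) (hl : l ≠ []) (i : Nat) (h : ∀ a ∈ l, i < a) :
    i < (l.min?).getD 0 := by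
  cases hm : l.min? with
  | none => exact absurd (List.min?_eq_none_iff.mp hm) hl
  | some m => exact h m (List.min?_mem hm)

-- The minimum of a list is at most any element.
theorem fci_min_le (l : List Nat) (a : Nat) (ha : a ∈ l) : (l.min?).getD 0 ≤ a := by
  cases hm : l.min? with
  | none => simp at hm; subst hm; cases ha
  | some m =>
    exact (List.min?_eq_some_iff.mp hm).2 a ha

-- The minimum of a nonempty constant list is that constant.
theorem fci_min_const (l : List Nat) (hl : l ≠ []) (n : Nat) (h : ∀ a ∈ l, a = n) :
    (l.min?).getD 0 = n := by
  cases hm : l.min? with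
  | none => exact absurd (List.min?_eq_none_iff.mp hm) hl
  | some m => exact h m (List.min?_mem hm)


-- B's whole else-branch characterised: transpose–filter–transpose equals the per-key gather
-- over the indices selected by A's row guard (under the Pre_ in-range condition).
theorem fci_alt_eq (data : List (String × List (List Int))) (x_key y_key : String)
    (xind_range yind_range : Int × Int) (xinds yinds : List (List Int))
    (hx : data.lookup x_key = some xinds) (hy : data.lookup y_key = some yinds)
    (hemp : (xinds.isEmpty || yinds.isEmpty) = false)
    (hsafe : ∀ i, i < xinds.length → fci_ok xinds yinds xind_range yind_range i = true →
      ∀ p ∈ data, i < p.2.length) :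
    find_common_indices_info_alt data x_key y_key xind_range yind_range
      = data.map (fun p => (p.1,
          ((List.range xinds.length).filter (fci_ok xinds yinds xind_range yind_range)).map
            (fun i => p.2.getD i []))) := by
  have hdata_ne : data ≠ [] := by intro h; subst h; simp [List.lookup] at hx
  obtain ⟨hxlt, hxcol⟩ := fci_lookup_idxOf data x_key xinds hx
  obtain ⟨hylt, hycol⟩ := fci_lookup_idxOf data y_key yinds hy
  have hclen : (data.map Prod.snd).length = data.length := by simp
  have hxlt' : (data.map Prod.fst).idxOf x_key < (data.map Prod.snd).length := by omega
  have hylt' : (data.map Prod.fst).idxOf y_key < (data.map Prod.snd).length := by omega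
  have hxg : (data.map Prod.snd)[(data.map Prod.fst).idxOf x_key]'hxlt' = xinds := by
    have := hxcol []
    rwa [List.getD_eq_getElem _ _ hxlt'] at this
  have hyg : (data.map Prod.snd)[(data.map Prod.fst).idxOf y_key]'hylt' = yinds := by
    have := hycol []
    rwa [List.getD_eq_getElem _ _ hylt'] at this
  set m := (((data.map Prod.snd).map List.length).min?).getD 0 with hm
  set rowOf := fun i => (data.map Prod.snd).map (fun c => c.getD i ([] : List Int)) with hrowOf
  -- the row guard, projected at the x/y columns, is A's index guard
  have hpred : ∀ i, fci_rowOk ((data.map Prod.fst).idxOf x_key) ((data.map Prod.fst).idxOf y_key)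
      xind_range yind_range (rowOf i) = fci_ok xinds yinds xind_range yind_range i := by
    intro i
    simp only [hrowOf, fci_rowOk, fci_ok]
    rw [fci_getD_map _ _ _ _ hxlt', fci_getD_map _ _ _ _ hylt']
    simp only [hxg, hyg]
  -- the shortest column is at most the x column
  have hmem_x : xinds.length ∈ (data.map Prod.snd).map List.length := by
    rw [← hxg]
    exact List.mem_map_of_mem (List.getElem_mem _)
  have hmle : m ≤ xinds.length := fci_min_le _ _ hmem_x
  have hlen_ne : (data.map Prod.snd).map List.length ≠ [] := by
    simp [hdata_ne]
  -- indices at or beyond the shortest column never match (else A indexes out of range)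
  have hfix : (List.range xinds.length).filter (fci_ok xinds yinds xind_range yind_range)
      = (List.range m).filter (fci_ok xinds yinds xind_range yind_range) := by
    have hNeq : xinds.length = m + (xinds.length - m) := (Nat.add_sub_cancel' hmle).symm
    rw [hNeq, List.range_add, List.filter_append]
    have hnil : ((List.range (xinds.length - m)).map (m + ·)).filter
        (fci_ok xinds yinds xind_range yind_range) = [] := by
      refine List.filter_eq_nil_iff.mpr ?_
      intro a ha
      simp only [List.mem_map, List.mem_range] at ha
      obtain ⟨j, hj, rfl⟩ := ha
      by_contra hokT'
      have hokT : fci_ok xinds yinds xind_range yind_range (m + j) = true := by simpa using hokT'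
      have hall := hsafe (m + j) (by omega) hokT
      have hlt : m + j < m := by
        refine fci_lt_min _ hlen_ne _ ?_
        intro a ha
        simp only [List.map_map, List.mem_map] at ha
        obtain ⟨p, hp, rfl⟩ := ha
        exact hall p hp
      omega
    rw [hnil, List.append_nil]
  -- the kept rows are the selected indices, materialised as rows
  have hzip : pyZip (data.map Prod.snd) = (List.range m).map rowOf := rfl
  have hkept : (pyZip (data.map Prod.snd)).filter
      (fci_rowOk ((data.map Prod.fst).idxOf x_key) ((data.map Prod.fst).idxOf y_key)
        xind_range yind_range)
      = ((List.range xinds.length).filter (fci_ok xinds yinds xind_range yind_range)).map rowOf := by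
    rw [hzip, List.filter_map, hfix]
    congr 1
    exact List.filter_congr (fun i _ => hpred i)
  unfold find_common_indices_info_alt
  rw [hx, hy]
  simp only [hemp, Bool.false_eq_true, if_false, hkept]
  set sel := (List.range xinds.length).filter (fci_ok xinds yinds xind_range yind_range) with hsel
  by_cases hke : (sel.map rowOf).isEmpty
  · -- no matching row: all-empty columns
    have hsel0 : sel = [] := by
      rcases sel with _ | ⟨a, t⟩
      · rfl
      · simp [List.isEmpty] at hke
    rw [hsel0]
    simp only [List.map_nil, List.isEmpty_nil, if_true, List.map_map]
    rw [List.zip_map']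
    simp
  · -- re-transpose the kept rows
    have hselne : sel ≠ [] := by
      intro h; rw [h] at hke; simp at hke
    simp only [hke, Bool.false_eq_true, if_false]
    have hmk : ((((sel.map rowOf).map List.length).min?).getD 0) = data.length := by
      refine fci_min_const _ (by simp [hselne]) _ ?_
      intro a ha
      simp only [List.map_map, List.mem_map, Function.comp] at ha
      obtain ⟨i, hi, rfl⟩ := ha
      simp [hrowOf]
    unfold pyZip
    rw [hmk]
    apply List.ext_getElem
    · simp
    · intro j h1 h2
      rw [List.getElem_zip]
      simp only [List.getElem_map, List.getElem_range, List.map_map]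
      have hj : j < data.length := by simpa using h2
      refine Prod.ext ?_ ?_
      · simp
      · simp only
        refine List.map_congr_left ?_
        intro i _
        show (rowOf i).getD j [] = (data[j]'hj).2.getD i []
        rw [hrowOf]
        rw [fci_getD_map _ _ _ _ (by simpa using hj)]
        simp

-- ===== VERDICT (by name: the statement is the Claim_ definition above) =====
theorem find_common_indices_info_spec : Claim_equal_find_common_indices_info := by
  intro data x_key y_key xind_range yind_range _ hpre
  obtain ⟨hnd, hbound⟩ := hpre
  unfold Spec_find_common_indices_info
  unfold find_common_indices_info
  cases hx : data.lookup x_key with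
  | none =>
    unfold find_common_indices_info_alt
    rw [hx]
  | some xinds =>
    cases hy : data.lookup y_key with
    | none =>
      unfold find_common_indices_info_alt
      rw [hx, hy]
    | some yinds =>
      by_cases hemp : (xinds.isEmpty || yinds.isEmpty) = true
      · unfold find_common_indices_info_alt
        rw [hx, hy]
        simp only [hemp, if_true]
        exact fci_init data hnd
      · have hemp' : (xinds.isEmpty || yinds.isEmpty) = false := by simpa using hemp
        have hsafe : ∀ i, i < xinds.length →
            fci_ok xinds yinds xind_range yind_range i = true → ∀ p ∈ data, i < p.2.length := by
          intro i hi hokT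
          have hyne : yinds ≠ [] := by
            intro h
            rw [h] at hemp'
            simp at hemp'
          rcases hbound with hb | hb
          · rw [hy] at hb
            exact absurd hb hyne
          · rw [hx, hy] at hb
            simp only [Option.getD_some] at hb
            unfold fci_ok at hokT
            simp only [Bool.and_eq_true, Bool.not_eq_eq_eq_not, Bool.not_true,
              List.isEmpty_eq_false_iff, decide_eq_true_eq] at hokT
            obtain ⟨⟨hxne, hyne'⟩, hcmp⟩ := hokT
            have := hb i hi hxne
            exact this.2 ⟨hyne', hcmp.1, hcmp.2.1, hcmp.2.2.1, hcmp.2.2.2⟩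
        rw [fci_alt_eq data x_key y_key xind_range yind_range xinds yinds hx hy hemp' hsafe]
        simp only [hemp', Bool.false_eq_true, if_false]
        have hcommon0 : ((data.map Prod.fst).foldl (fun d k => PySem.Dict.insert d k [])
            PySem.Dict.empty)
            = PySem.Dict.mk (data.map (fun p => (p.1, ([] : List (List Int))))) :=
          PySem.Dict.ext (fci_init data hnd)
        rw [hcommon0, fci_loop data hnd (fci_ok xinds yinds xind_range yind_range)
          (List.range xinds.length) (fun _ => [])]
        simp
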